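-- pv_equiv track=rewrite | github.com/beel13/Party-hub- | party_server.py | unique_answer_pids
-- ===== SOURCE A (Python) =====
-- from typing import Any, Dict, List, Optional, Tuple
--
-- def normalize_text(text: str) -> str:
--     cleaned = " ".join(text.strip().lower().split())
--     for prefix in ("a ", "an ", "the "):
--         if cleaned.startswith(prefix):
--             cleaned = cleaned[len(prefix) :].strip()
--             break
--     return cleaned
--
-- def unique_answer_pids(submissions: Dict[str, Any]) -> List[str]:
--     normalized_map: Dict[str, List[str]] = {}
--     for pid, answer in submissions.items():
--         normalized = normalize_text(str(answer))
--         if not normalized: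
--             continue
--         normalized_map.setdefault(normalized, []).append(pid)
--     unique = []
--     for pids in normalized_map.values():
--         if len(pids) == 1:
--             unique.append(pids[0])
--     return unique
-- ===== SOURCE B (Python) =====
-- from typing import Any, Dict, List
--
-- def normalize_text(text: str) -> str:
--     cleaned = " ".join(text.strip().lower().split())
--     for prefix in ("a ", "an ", "the "):
--         if cleaned.startswith(prefix):
--             cleaned = cleaned[len(prefix) :].strip()
--             break
--     return cleaned
--
-- def unique_answer_pids(submissions: Dict[str, Any]) -> List[str]:
--     counts: Dict[str, int] = {}
--     for pid, answer in submissions.items():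
--         key = normalize_text(str(answer))
--         if key:
--             counts[key] = counts.get(key, 0) + 1
--     result: List[str] = []
--     for pid, answer in submissions.items():
--         key = normalize_text(str(answer))
--         if key and counts[key] == 1:
--             result.append(pid)
--     return result
-- ===== Notes on version B (the rewrite author's own statement) =====
-- stated objective: alternative
-- what changed: Replaces the dict of grouped pid-lists (then a scan over its values) by a frequency counter built in one pass plus a second pass over the original submissions emitting each pid whose normalized answer occurs exactly once; order is preserved because a unique key's single submission is its first appearance.
import Mathlib
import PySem

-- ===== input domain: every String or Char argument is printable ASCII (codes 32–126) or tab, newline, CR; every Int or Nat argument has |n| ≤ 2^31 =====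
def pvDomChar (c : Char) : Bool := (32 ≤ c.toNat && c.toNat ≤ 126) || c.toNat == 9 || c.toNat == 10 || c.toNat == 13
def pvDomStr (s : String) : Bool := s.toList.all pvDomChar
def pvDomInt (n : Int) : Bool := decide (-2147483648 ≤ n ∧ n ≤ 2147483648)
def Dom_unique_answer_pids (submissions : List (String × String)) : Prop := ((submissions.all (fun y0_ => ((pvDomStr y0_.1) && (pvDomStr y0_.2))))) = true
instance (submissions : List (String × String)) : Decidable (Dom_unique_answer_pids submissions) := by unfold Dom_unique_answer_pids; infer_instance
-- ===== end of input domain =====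

-- B replaces A's grouped pid-lists dict by a one-pass frequency counter plus a second pass
-- over the original submissions (alternative decomposition; return value proved equal).

-- ===== PORT A =====
def normalize_article (cleaned : String) : List String → String
  | [] => cleaned
  | p :: rest =>
    if PySem.Str.startswith cleaned p then
      PySem.Str.strip (PySem.Str.slice cleaned (some (PySem.Str.len p)) none)
    else normalize_article cleaned rest

def normalize_text (text : String) : String :=
  let cleaned := PySem.Str.join " " (PySem.Str.split₀ (PySem.Str.lower (PySem.Str.strip text)))
  normalize_article cleaned ["a ", "an ", "the "]

def unique_answer_pids (submissions : List (String × String)) : List String :=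
  let normalizedMap : PySem.Dict String (List String) :=
    submissions.foldl (fun m pa =>
      let normalized := normalize_text pa.2
      if normalized = "" then m
      else m.modify normalized [] (fun ps => ps ++ [pa.1])) PySem.Dict.empty
  normalizedMap.values.foldl (fun unique pids =>
    if pids.length = 1 then unique ++ [PySem.List.pyGetD pids 0 ""] else unique) []

-- ===== PORT B =====
def unique_answer_pids_alt (submissions : List (String × String)) : List String :=
  let counts : PySem.Dict String Int :=
    submissions.foldl (fun d pa =>
      let key := normalize_text pa.2
      if key = "" then d else d.insert key (d.getD key 0 + 1)) PySem.Dict.empty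
  submissions.foldl (fun res pa =>
    let key := normalize_text pa.2
    if key ≠ "" ∧ counts.getD key 0 = 1 then res ++ [pa.1] else res) []

-- ===== PRECONDITION & SPEC =====
def Spec_unique_answer_pids (submissions : List (String × String)) (out : List String) : Prop := out = unique_answer_pids_alt submissions
instance (submissions : List (String × String)) (out : List String) : Decidable (Spec_unique_answer_pids submissions out) := by unfold Spec_unique_answer_pids; infer_instance

-- ===== CLAIM (what is proved, stated in full; the proofs are below) =====
def Claim_equal_unique_answer_pids : Prop := ∀ (submissions : List (String × String)), Dom_unique_answer_pids submissions → Spec_unique_answer_pids submissions (unique_answer_pids submissions)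

-- ===== LEMMAS AND PROOFS =====
-- the normalized (key, pid) pairs of the non-empty-key submissions, in order
def pvPairs (f : String → String) (submissions : List (String × String)) : List (String × String) :=
  (submissions.filter (fun pa => !(f pa.2 == ""))).map (fun pa => (f pa.2, pa.1))

def pvGroup (m : List (String × String)) (k : String) : List String :=
  (m.filter (fun p => p.1 == k)).map Prod.snd

def pvOutA (m : List (String × String)) : List String :=
  ((PySem.Set.ofList (m.map Prod.fst)).filter (fun k => (pvGroup m k).length == 1)).map
    (fun k => (pvGroup m k).getD 0 "")

def pvOutB (m : List (String × String)) : List String :=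
  (m.filter (fun p => (m.map Prod.fst).count p.1 == 1)).map Prod.snd

lemma pvDiscard_eq (s : List String) (x : String) :
    PySem.Set.discard s x = s.filter (fun y => !(y == x)) := by
  simp [PySem.Set.discard]

lemma pvOfList_filter (q : String → Bool) (xs : List String) :
    PySem.Set.ofList (xs.filter q) = (PySem.Set.ofList xs).filter q := by
  induction xs with
  | nil => rfl
  | cons x xs ih =>
    by_cases h : q x = true
    · simp [h, PySem.Set.ofList_cons, ih, pvDiscard_eq, List.filter_filter, Bool.and_comm]
    · simp only [List.filter_cons, h, if_neg, PySem.Set.ofList_cons, ih, pvDiscard_eq,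
        List.filter_filter, Bool.false_eq_true, ↓reduceIte]
      apply List.filter_congr
      intro y hy
      by_cases hyx : y = x
      · subst hyx; simp [h]
      · simp [hyx]

lemma pvCore (m : List (String × String)) : pvOutA m = pvOutB m := by
  match m with
  | [] => rfl
  | p :: m' =>
    have ih := pvCore (m'.filter (fun q => !(q.1 == p.1)))
    set mf := m'.filter (fun q => !(q.1 == p.1)) with hmf
    -- group at p.1
    have hgr : pvGroup (p :: m') p.1 = p.2 :: pvGroup m' p.1 := by
      simp [pvGroup]
    -- keys
    have hkeys : PySem.Set.ofList ((p :: m').map Prod.fst)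
        = p.1 :: PySem.Set.ofList (mf.map Prod.fst) := by
      rw [List.map_cons, PySem.Set.ofList_cons, pvDiscard_eq, ← pvOfList_filter]
      simp [hmf, List.filter_map, Function.comp]
      rfl
    -- groups for keys ≠ p.1
    have hgne : ∀ k, k ≠ p.1 → pvGroup (p :: m') k = pvGroup mf k := by
      intro k hk
      simp only [pvGroup, hmf, List.filter_filter, List.filter_cons]
      have : (p.1 == k) = false := by simpa using fun h => hk h.symm
      rw [this]
      simp only [Bool.false_eq_true, ↓reduceIte]
      congr 1
      apply List.filter_congr
      intro q hq
      by_cases h1 : q.1 = k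
      · simp [h1, (by simpa using hk : (k == p.1) = false)]
      · simp [h1]
    -- A side
    have hA : pvOutA (p :: m')
        = (if pvGroup m' p.1 = [] then [p.2] else []) ++ pvOutA mf := by
      rw [pvOutA, hkeys, List.filter_cons]
      have hmem : ∀ k ∈ PySem.Set.ofList (mf.map Prod.fst), k ≠ p.1 := by
        intro k hk
        rw [PySem.Set.mem_ofList] at hk
        obtain ⟨q, hq, rfl⟩ := List.mem_map.mp hk
        simpa using List.of_mem_filter hq
      have htail : ((PySem.Set.ofList (mf.map Prod.fst)).filter
            (fun k => (pvGroup (p :: m') k).length == 1)).map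
            (fun k => (pvGroup (p :: m') k).getD 0 "") = pvOutA mf := by
        rw [pvOutA, List.filter_congr (fun k hk => by rw [hgne k (hmem k hk)])]
        apply List.map_congr_left
        intro k hk
        rw [hgne k (hmem k (List.mem_of_mem_filter hk))]
      rw [hgr]
      by_cases h0 : pvGroup m' p.1 = []
      · simp only [h0, List.length_cons, List.length_nil, Nat.zero_add, beq_self_eq_true,
          if_pos, List.map_cons, List.getD_cons_zero, htail]
        simp [hgr]
      · have : ((p.2 :: pvGroup m' p.1).length == 1) = false := by
          have := List.length_pos_iff.mpr h0
          simp; omega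
        rw [this]
        simp only [Bool.false_eq_true, ↓reduceIte, htail, h0, List.nil_append]
    -- B side
    have hcnt0 : (pvGroup m' p.1 = []) ↔ ((m'.map Prod.fst).count p.1 = 0) := by
      simp only [pvGroup, List.map_eq_nil_iff, List.filter_eq_nil_iff, List.count_eq_zero,
        List.mem_map]
      constructor
      · rintro h ⟨q, hq, hq1⟩
        exact h q hq (by simp [hq1])
      · intro h q hq hb
        exact h ⟨q, hq, by simpa using hb⟩
    have hB : pvOutB (p :: m')
        = (if pvGroup m' p.1 = [] then [p.2] else []) ++ pvOutB mf := by
      rw [pvOutB, List.map_cons, List.filter_cons]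
      have htailB : m'.filter (fun q => ((p.1 :: m'.map Prod.fst).count q.1 == 1))
          = mf.filter (fun q => ((mf.map Prod.fst).count q.1 == 1)) := by
        rw [hmf, List.filter_filter]
        apply List.filter_congr
        intro q hq
        by_cases hq1 : q.1 = p.1
        · have hmem1 : p.1 ∈ m'.map Prod.fst := List.mem_map.mpr ⟨q, hq, hq1⟩
          have : 1 ≤ (m'.map Prod.fst).count p.1 := List.one_le_count_iff.mpr hmem1
          simp [hq1, List.count_cons]
          omega
        · have hne : (q.1 == p.1) = false := by simpa using hq1
          have hmk : (mf.map Prod.fst) = (m'.map Prod.fst).filter (fun y => !(y == p.1)) := by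
            rw [hmf, List.filter_map]; rfl
          rw [hmk, List.count_filter (by simpa using hq1)]
          simp [List.count_cons, hq1, hne, Ne.symm hq1]
      rw [htailB]
      by_cases h0 : pvGroup m' p.1 = []
      · have hc := hcnt0.mp h0
        simp [List.count_cons_self, hc, pvOutB, h0]
      · have hc : (m'.map Prod.fst).count p.1 ≠ 0 := fun h => h0 (hcnt0.mpr h)
        have hfalse : ((p.1 :: m'.map Prod.fst).count p.1 == 1) = false := by
          simp [List.count_cons_self]
          omega
        rw [hfalse]
        simp [h0, pvOutB]
    rw [hA, hB, ih]
termination_by m.length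
decreasing_by have := List.length_filter_le (fun q => !(q.1 == p.1)) m'; simp; omega

lemma A_eqF (f : String → String) (s : List (String × String)) :
    ((s.foldl (fun m pa =>
        let normalized := f pa.2
        if normalized = "" then m
        else m.modify normalized [] (fun ps => ps ++ [pa.1]))
      (PySem.Dict.empty : PySem.Dict String (List String))).values).foldl
      (fun unique pids =>
        if pids.length = 1 then unique ++ [PySem.List.pyGetD pids 0 ""] else unique) []
      = pvOutA (pvPairs f s) := by
  have h1 : s.foldl (fun m pa =>
        let normalized := f pa.2
        if normalized = "" then m
        else m.modify normalized [] (fun ps => ps ++ [pa.1])) PySem.Dict.empty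
      = (pvPairs f s).foldl (fun d q => d.modify q.1 [] (fun ps => ps ++ [q.2]))
          PySem.Dict.empty := by
    rw [pvPairs, List.foldl_map, List.foldl_filter]
    congr 1
    funext d pa
    by_cases h : f pa.2 = "" <;> simp [h]
  rw [h1]
  have hnd : (((pvPairs f s).foldl (fun d q => d.modify q.1 [] (fun ps => ps ++ [q.2]))
      PySem.Dict.empty)).keys.Nodup := by
    apply PySem.Dict.nodup_keys_foldl_modify_key (pvPairs f s) Prod.fst [] (fun _ q => (· ++ [q.2]))
    simp [PySem.Dict.keys_empty]
  rw [PySem.Dict.values_eq_map_keys _ hnd []]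
  rw [PySem.Dict.keys_foldl_modify_key (pvPairs f s) Prod.fst [] (fun _ q => (· ++ [q.2]))]
  rw [PySem.Dict.keys_empty, PySem.Set.update_nil_left]
  have h2 : ∀ k, ((pvPairs f s).foldl (fun d q => d.modify q.1 [] (fun ps => ps ++ [q.2]))
      PySem.Dict.empty).getD k [] = pvGroup (pvPairs f s) k := by
    intro k
    rw [PySem.Dict.getD_foldl_modify_append, PySem.Dict.getD_empty]
    rfl
  calc (List.map (fun k => ((pvPairs f s).foldl (fun d q => d.modify q.1 [] (fun ps => ps ++ [q.2]))
            PySem.Dict.empty).getD k []) (PySem.Set.ofList ((pvPairs f s).map Prod.fst))).foldl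
          (fun unique pids => if pids.length = 1 then unique ++ [PySem.List.pyGetD pids 0 ""] else unique) []
      = ((PySem.Set.ofList ((pvPairs f s).map Prod.fst)).map (fun k => pvGroup (pvPairs f s) k)).foldl
          (fun unique pids => if pids.length = 1 then unique ++ [PySem.List.pyGetD pids 0 ""] else unique) [] := by
        congr 1
        apply List.map_congr_left
        intro k _
        exact h2 k
    _ = pvOutA (pvPairs f s) := by
        have hb : ∀ (L : List (List String)) (acc : List String),
            L.foldl (fun unique pids => if pids.length = 1 then unique ++ [PySem.List.pyGetD pids 0 ""] else unique) acc
            = L.foldl (fun unique pids => if (pids.length == 1) = true then unique ++ [pids.getD 0 ""] else unique) acc := by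
          intro L
          induction L with
          | nil => intro acc; rfl
          | cons x L ih =>
            intro acc
            simp only [List.foldl_cons, ih]
            by_cases h : x.length = 1 <;> simp [h, PySem.List.pyGetD_zero]
        rw [hb, PySem.List.foldl_append_if, List.nil_append, pvOutA, List.filter_map, List.map_map]
        rfl

lemma B_eqF (f : String → String) (s : List (String × String)) :
    s.foldl (fun res pa =>
      if f pa.2 ≠ "" ∧ (s.foldl (fun d pa =>
          if f pa.2 = "" then d
          else d.insert (f pa.2) (d.getD (f pa.2) 0 + 1))
          (PySem.Dict.empty : PySem.Dict String Int)).getD (f pa.2) 0 = 1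
      then res ++ [pa.1] else res) []
      = pvOutB (pvPairs f s) := by
  have h1 : s.foldl (fun d pa =>
        if f pa.2 = "" then d
        else d.insert (f pa.2) (d.getD (f pa.2) 0 + 1))
          (PySem.Dict.empty : PySem.Dict String Int)
      = ((pvPairs f s).map Prod.fst).foldl (fun d k => d.insert k (d.getD k 0 + 1))
          PySem.Dict.empty := by
    rw [pvPairs, List.map_map, List.foldl_map, List.foldl_filter]
    congr 1
    funext d pa
    by_cases h : f pa.2 = "" <;> simp [h]
  have hcount : ∀ k, (s.foldl (fun d pa =>
        if f pa.2 = "" then d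
        else d.insert (f pa.2) (d.getD (f pa.2) 0 + 1))
          (PySem.Dict.empty : PySem.Dict String Int)).getD k 0
      = (((pvPairs f s).map Prod.fst).count k : Int) := by
    intro k
    simp only [h1]
    rw [PySem.Dict.getD_foldl_insert_add_one, PySem.Dict.getD_empty]
    ring
  have hstep : (fun (res : List String) (pa : String × String) =>
      if f pa.2 ≠ "" ∧ (s.foldl (fun d pa =>
          if f pa.2 = "" then d
          else d.insert (f pa.2) (d.getD (f pa.2) 0 + 1))
          (PySem.Dict.empty : PySem.Dict String Int)).getD (f pa.2) 0 = 1
      then res ++ [pa.1] else res)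
      = (fun res pa =>
      if (!(f pa.2 == "") &&
          (((pvPairs f s).map Prod.fst).count (f pa.2) == 1)) = true
      then res ++ [(fun (q : String × String) => q.1) pa] else res) := by
    funext res pa
    simp only [hcount]
    by_cases h : f pa.2 = ""
    · simp [h]
    · by_cases h2 : ((pvPairs f s).map Prod.fst).count (f pa.2) = 1 <;> simp [h, h2]
  rw [hstep]
  rw [PySem.List.foldl_append_if, List.nil_append, pvOutB, pvPairs, List.filter_map,
    List.map_map, List.filter_filter]
  simp only [List.map_map, Function.comp_def]
  congr 1
  apply List.filter_congr
  intro pa _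
  simp [Bool.and_comm]

-- ===== VERDICT (by name: the statement is the Claim_ definition above) =====
theorem unique_answer_pids_spec : Claim_equal_unique_answer_pids := by
  intro submissions _
  unfold Spec_unique_answer_pids
  have hA : unique_answer_pids submissions
      = pvOutA (pvPairs normalize_text submissions) := A_eqF normalize_text submissions
  have hB : unique_answer_pids_alt submissions
      = pvOutB (pvPairs normalize_text submissions) := B_eqF normalize_text submissions
  rw [hA, hB, pvCore]
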